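-- pv_equiv track=rewrite | github.com/saliksyed/vision-experiments | src/scan_google_fonts.py | simhash64
-- ===== SOURCE A (Python) =====
-- from typing import Dict, Iterable, List, Optional, Tuple
--
-- def simhash64(token_counts: Dict[int, int]) -> int:
--     """
--     Weighted SimHash over 64 bits. token_counts keys are 64-bit-ish ints.
--     """
--     v = [0] * 64
--     for tok, w in token_counts.items():
--         # ensure 64-bit token
--         x = tok & ((1 << 64) - 1)
--         for i in range(64):
--             bit = (x >> i) & 1
--             v[i] += w if bit else -w
--
--     out = 0
--     for i in range(64):
--         if v[i] >= 0:
--             out |= (1 << i)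
--     return out
-- ===== SOURCE B (Python) =====
-- def simhash64(token_counts):
--     """
--     Weighted SimHash over 64 bits, computed bit-major.
--
--     No mutable per-bit balance array: mask the tokens once, take the total
--     weight, then for each bit position make one pass summing the weights of
--     tokens having that bit set; bit i belongs in the hash exactly when that
--     sum is at least half the total (the signed balance is 2*S - total), and
--     the hash is assembled as a sum of powers of two.
--     """
--     items = [(tok & 0xFFFFFFFFFFFFFFFF, w) for tok, w in token_counts.items()]
--     total = sum(w for _, w in items)
--     return sum(1 << i for i in range(64)
--                if 2 * sum(w for x, w in items if (x >> i) & 1) >= total)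
-- ===== Notes on version B (the rewrite author's own statement) =====
-- stated objective: alternative
-- what changed: B inverts the loop nesting and removes all mutable state: instead of A's single token-major pass updating a 64-entry signed-balance array and OR-ing bits where the balance is nonnegative, B masks the tokens once, takes the total weight, then for each bit position does one bit-major pass summing (via comprehensions) the weights of tokens with that bit set, and assembles the hash as a sum of powers 2^i where twice that sum reaches the total.
import Mathlib
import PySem

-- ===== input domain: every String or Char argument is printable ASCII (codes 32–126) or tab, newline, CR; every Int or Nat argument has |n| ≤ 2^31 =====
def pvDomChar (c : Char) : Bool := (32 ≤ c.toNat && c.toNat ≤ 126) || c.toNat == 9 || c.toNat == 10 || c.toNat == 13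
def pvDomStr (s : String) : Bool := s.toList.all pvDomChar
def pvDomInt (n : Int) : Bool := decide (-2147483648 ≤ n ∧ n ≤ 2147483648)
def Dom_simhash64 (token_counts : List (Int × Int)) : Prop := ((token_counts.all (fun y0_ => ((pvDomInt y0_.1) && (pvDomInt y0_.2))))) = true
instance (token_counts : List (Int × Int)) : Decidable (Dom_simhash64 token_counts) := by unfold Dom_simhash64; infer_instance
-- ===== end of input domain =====

-- B computes the hash bit-major with no mutable state: one pass per bit summing the weights of
-- tokens with that bit set, compared against the total weight; objective: alternative.


-- ===== PORT A =====
-- one token's update of v: x = tok & ((1 << 64) - 1); for i in range(64): v[i] += w if (x >> i) & 1 else -w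
-- (range(64) indices are the nonnegative 0..63, so Nat indices are exact here)
def pvStepA (v : List Int) (p : Int × Int) : List Int :=
  let x := PySem.Int.band p.1 (((1 : Int) <<< (64 : Nat)) - 1)
  (List.range 64).foldl (fun v (i : Nat) =>
    let bit := PySem.Int.band (x >>> i) 1
    v.set i (v.getD i 0 + (if bit ≠ 0 then p.2 else -p.2))) v

def simhash64 (token_counts : List (Int × Int)) : Int :=
  let v := token_counts.foldl pvStepA (List.replicate 64 0)
  (List.range 64).foldl
    (fun out (i : Nat) => if 0 ≤ v.getD i 0 then PySem.Int.bor out ((1 : Int) <<< i) else out) 0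

-- ===== PORT B =====
-- items = [(tok & mask, w) …]; total = sum of weights;
-- sum(1 << i for i in range(64) if 2 * sum(w for x, w in items if (x >> i) & 1) >= total)
def simhash64_alt (token_counts : List (Int × Int)) : Int :=
  let items := token_counts.map
    (fun p => (PySem.Int.band p.1 (((1 : Int) <<< (64 : Nat)) - 1), p.2))
  let total := (items.map Prod.snd).sum
  (List.range 64).foldl
    (fun acc (i : Nat) =>
      if total ≤ 2 * ((items.filter (fun (q : Int × Int) => PySem.Int.band (q.1 >>> i) 1 != 0)).map Prod.snd).sum
      then acc + ((1 : Int) <<< i) else acc) 0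

-- ===== PRECONDITION & SPEC =====
def Spec_simhash64 (token_counts : List (Int × Int)) (out : Int) : Prop := out = simhash64_alt token_counts
instance (token_counts : List (Int × Int)) (out : Int) : Decidable (Spec_simhash64 token_counts out) := by unfold Spec_simhash64; infer_instance

-- ===== CLAIM (what is proved, stated in full; the proofs are below) =====
def Claim_equal_simhash64 : Prop := ∀ (token_counts : List (Int × Int)), Dom_simhash64 token_counts → Spec_simhash64 token_counts (simhash64 token_counts)

-- ===== LEMMAS AND PROOFS =====

-- abbreviations used only by the proofs: B's masked pair, per-bit weight sum, total weight
def pvMask (p : Int × Int) : Int × Int :=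
  (PySem.Int.band p.1 (((1 : Int) <<< (64 : Nat)) - 1), p.2)

def pvS (i : Nat) (l : List (Int × Int)) : Int :=
  (((l.map pvMask).filter (fun (q : Int × Int) => PySem.Int.band (q.1 >>> i) 1 != 0)).map Prod.snd).sum

def pvT (l : List (Int × Int)) : Int := ((l.map pvMask).map Prod.snd).sum

-- getD after set, for an in-range index
lemma pv_getD_set (v : List Int) (i j : Nat) (a : Int) (hi : i < v.length) :
    (v.set i a).getD j 0 = if j = i then a else v.getD j 0 := by
  rcases eq_or_ne j i with rfl | h
  · simp [List.getD, hi]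
  · simp [List.getD, Ne.symm h]
    intro hji; exact absurd hji h

-- a fold over range n updating index i in place via σ acts pointwise
lemma pv_foldl_range_set (σ : List Int → Nat → List Int) (g : Nat → Int → Int)
    (h1 : ∀ v i, (σ v i).length = v.length)
    (h2 : ∀ v i j, i < v.length → (σ v i).getD j 0 = if j = i then g i (v.getD j 0) else v.getD j 0) :
    ∀ (n : Nat) (v : List Int), n ≤ v.length →
      ((List.range n).foldl σ v).length = v.length ∧
      ∀ j, ((List.range n).foldl σ v).getD j 0 =
        if j < n then g j (v.getD j 0) else v.getD j 0 := by
  intro n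
  induction n with
  | zero => intro v _; simp
  | succ n ih =>
    intro v hn
    have hn' : n ≤ v.length := Nat.le_of_succ_le hn
    obtain ⟨hlen, hget⟩ := ih v hn'
    rw [List.range_succ, List.foldl_append]
    simp only [List.foldl_cons, List.foldl_nil]
    have hnl : n < ((List.range n).foldl σ v).length := by omega
    refine ⟨by rw [h1, hlen], ?_⟩
    intro j
    rw [h2 _ _ _ hnl, hget]
    rcases eq_or_ne j n with rfl | h
    · simp
    · have hiff : (j < n + 1) = (j < n) := by apply propext; omega
      simp [h, hiff]

-- one A-step acts pointwise: v[j] += (if bit j of the masked token then w else -w)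
lemma pv_stepA_char (v : List Int) (p : Int × Int) (hv : v.length = 64) :
    (pvStepA v p).length = 64 ∧
    ∀ j < 64, (pvStepA v p).getD j 0 = v.getD j 0 +
      (if PySem.Int.band ((pvMask p).1 >>> j) 1 ≠ 0 then p.2 else -p.2) := by
  have h := pv_foldl_range_set
    (fun v (i : Nat) =>
      let bit := PySem.Int.band ((PySem.Int.band p.1 (((1 : Int) <<< (64 : Nat)) - 1)) >>> i) 1
      v.set i (v.getD i 0 + (if bit ≠ 0 then p.2 else -p.2)))
    (fun i a => a +
      (if PySem.Int.band ((PySem.Int.band p.1 (((1 : Int) <<< (64 : Nat)) - 1)) >>> i) 1 ≠ 0 then p.2 else -p.2))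
    (by intro v i; simp)
    (by
      intro v i j hi
      dsimp only
      rw [pv_getD_set _ _ _ _ hi]
      rcases eq_or_ne j i with rfl | h
      · simp
      · simp [h])
    64 v (by omega)
  obtain ⟨hl, hg⟩ := h
  have e : pvStepA v p = (List.range 64).foldl
    (fun v (i : Nat) =>
      let bit := PySem.Int.band ((PySem.Int.band p.1 (((1 : Int) <<< (64 : Nat)) - 1)) >>> i) 1
      v.set i (v.getD i 0 + (if bit ≠ 0 then p.2 else -p.2))) v := rfl
  refine ⟨by rw [e, hl, hv], ?_⟩
  intro j hj
  have hgj := hg j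
  rw [if_pos hj] at hgj
  rw [e, hgj]
  simp [pvMask]

-- the A-fold's balance array, pointwise: v[j] = 2 * pvS j l - pvT l (starting from v)
lemma pv_foldA_char :
    ∀ (l : List (Int × Int)) (v : List Int), v.length = 64 →
      (l.foldl pvStepA v).length = 64 ∧
      ∀ j < 64, (l.foldl pvStepA v).getD j 0 = v.getD j 0 + 2 * pvS j l - pvT l := by
  intro l
  induction l with
  | nil =>
    intro v hv
    refine ⟨hv, ?_⟩
    intro j hj
    simp only [List.foldl_nil, pvS, pvT, List.map_nil, List.filter_nil, List.sum_nil]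
    ring
  | cons p t ih =>
    intro v hv
    obtain ⟨hl1, hc1⟩ := pv_stepA_char v p hv
    obtain ⟨hl2, hc2⟩ := ih (pvStepA v p) hl1
    rw [List.foldl_cons]
    refine ⟨hl2, ?_⟩
    intro j hj
    rw [hc2 j hj, hc1 j hj]
    have hS : pvS j (p :: t) =
        (if PySem.Int.band ((pvMask p).1 >>> j) 1 ≠ 0 then p.2 else 0) + pvS j t := by
      simp only [pvS, List.map_cons, List.filter_cons]
      split_ifs with h h2 h3
      · simp [pvMask] at *
      · simp [pvMask] at *; omega
      · simp [pvMask] at *; omega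
      · simp
    have hT : pvT (p :: t) = p.2 + pvT t := by simp [pvT, pvMask]
    rw [hS, hT]
    split_ifs <;> ring

-- a fold over the same list with the same conditional combiner and equivalent conditions agrees
lemma pv_foldl_if_congr (g : Int → Nat → Int) (p q : Nat → Prop) [DecidablePred p] [DecidablePred q] :
    ∀ (l : List Nat), (∀ i ∈ l, p i ↔ q i) → ∀ (init : Int),
      l.foldl (fun out i => if p i then g out i else out) init =
      l.foldl (fun out i => if q i then g out i else out) init := by
  intro l
  induction l with
  | nil => intro _ _; rfl
  | cons a t ih =>
    intro h init
    simp only [List.foldl_cons]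
    have ha : p a ↔ q a := h a (by simp)
    by_cases hp : p a
    · rw [if_pos hp, if_pos (ha.mp hp)]; exact ih (fun i hi => h i (by simp [hi])) _
    · rw [if_neg hp, if_neg (fun hq => hp (ha.mpr hq))]; exact ih (fun i hi => h i (by simp [hi])) _

-- for a number below 2^n, OR-ing in the bit 2^n is addition
lemma pv_nat_lor_pow (m n : Nat) (h : m < 2 ^ n) : m ||| 2 ^ n = m + 2 ^ n := by
  apply Nat.eq_of_testBit_eq
  intro j
  rw [Nat.add_comm m (2 ^ n), Nat.testBit_lor]
  rcases lt_trichotomy j n with hj | rfl | hj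
  · rw [Nat.testBit_two_pow_add_gt hj, Nat.testBit_two_pow_of_ne (by omega), Bool.or_false]
  · rw [Nat.testBit_two_pow_self, Nat.testBit_two_pow_add_eq]
    simp [Nat.testBit_lt_two_pow h]
  · have h1 : m + 2 ^ n < 2 ^ j := by
      have : 2 ^ (n + 1) ≤ 2 ^ j := Nat.pow_le_pow_right (by norm_num) hj
      have := Nat.pow_lt_pow_right (a := 2) (by norm_num) (Nat.lt_succ_self n)
      omega
    rw [Nat.add_comm, Nat.testBit_lt_two_pow h1,
        Nat.testBit_lt_two_pow (by omega : m < 2 ^ j),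
        Nat.testBit_two_pow_of_ne (by omega), Bool.or_false]

lemma pv_shl_one (n : Nat) : (1 : Int) <<< n = ((2 ^ n : Nat) : Int) := by
  rw [Int.shiftLeft_eq]
  push_cast
  ring

lemma pv_bor_pow (a : Int) (n : Nat) (h0 : 0 ≤ a) (h : a < (2 : Int) ^ n) :
    PySem.Int.bor a ((1 : Int) <<< n) = a + (1 : Int) <<< n := by
  obtain ⟨m, rfl⟩ := Int.eq_ofNat_of_zero_le h0
  rw [pv_shl_one]
  rw [PySem.Int.bor_natCast]
  have hm : m < 2 ^ n := by exact_mod_cast h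
  rw [pv_nat_lor_pow m n hm]
  push_cast
  ring

-- A's OR-assembly fold equals B's sum-assembly fold for the same per-bit condition
lemma pv_or_add (c : Nat → Prop) [DecidablePred c] :
    ∀ (n : Nat),
      ((List.range n).foldl (fun out i => if c i then PySem.Int.bor out ((1 : Int) <<< i) else out) 0 =
        (List.range n).foldl (fun out i => if c i then out + ((1 : Int) <<< i) else out) 0) ∧
      0 ≤ (List.range n).foldl (fun out i => if c i then out + ((1 : Int) <<< i) else out) 0 ∧
      (List.range n).foldl (fun out i => if c i then out + ((1 : Int) <<< i) else out) 0 < (2 : Int) ^ n := by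
  intro n
  induction n with
  | zero => simp
  | succ n ih =>
    obtain ⟨heq, h0, hlt⟩ := ih
    rw [List.range_succ, List.foldl_append, List.foldl_append]
    simp only [List.foldl_cons, List.foldl_nil]
    have hpow : (2 : Int) ^ (n + 1) = 2 ^ n + 2 ^ n := by ring
    have hshl : (1 : Int) <<< n = (2 : Int) ^ n := by
      rw [pv_shl_one]; push_cast; ring
    have hp : (0 : Int) < 2 ^ n := by positivity
    by_cases hc : c n
    · simp only [if_pos hc]
      rw [heq, pv_bor_pow _ n h0 hlt]
      exact ⟨rfl, by rw [hshl]; omega, by rw [hshl]; omega⟩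
    · simp only [if_neg hc]
      exact ⟨heq, h0, by omega⟩

-- ===== VERDICT (by name: the statement is the Claim_ definition above) =====
theorem simhash64_spec : Claim_equal_simhash64 := by
  intro tc _
  unfold Spec_simhash64
  obtain ⟨hlen, hchar⟩ := pv_foldA_char tc (List.replicate 64 0) (by simp)
  have h1 := (pv_or_add (fun i => 0 ≤ (tc.foldl pvStepA (List.replicate 64 0)).getD i 0) 64).1
  have hcongr := pv_foldl_if_congr (fun out i => out + ((1 : Int) <<< i))
    (fun i => 0 ≤ (tc.foldl pvStepA (List.replicate 64 0)).getD i 0)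
    (fun i => pvT tc ≤ 2 * pvS i tc)
    (List.range 64)
    (by
      intro i hi
      have hi64 : i < 64 := List.mem_range.mp hi
      dsimp only
      rw [hchar i hi64, List.getD_replicate]
      omega
      omega)
    0
  exact h1.trans hcongr
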